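-- pv_equiv track=rewrite | github.com/yashlal/Microbial-Vector-Field-Analysis | lstm_multichannel6.py | create_inout_sequences3
-- ===== SOURCE A (Python) =====
-- def create_inout_sequences3(iners_col, tw, p_labels):
--     train_inout_seq = []
--     train_indices = []
--     for i in range(len(iners_col)-tw):
--         in_l = iners_col[i:i+tw]
--         out_val = iners_col[i+tw:i+tw+1][0]
--
--         check_l = p_labels[i:i+tw+1]
--
--         if all([check_l[i]==check_l[0] for i in range(len(check_l))]):
--             if all([k1[0]>=0 for k1 in in_l]) and all([k2>=0 for k2 in out_val]):
--                 train_inout_seq.append((in_l, out_val))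
--                 train_indices.append(i+tw)
--
--     test_seqs = []
--     test_indices = []
--     for j in range(len(iners_col)-2*tw):
--         iners_l2 = iners_col[j:j+2*tw]
--         check_l2 = p_labels[j:j+2*tw]
--         if all([k3[0]>=0 for k3 in iners_l2]) and all([check_l2[q]==check_l2[0] for q in range(len(check_l2))]):
--             test_seq = (iners_col[j:j+tw], iners_col[j+tw:j+2*tw])
--             test_seqs.append(test_seq)
--             test_indices.append(j+tw)
--
--     return train_inout_seq, test_seqs, (train_indices, test_indices)
-- ===== SOURCE B (Python) =====
-- def _true_runs(bs):
--     # runs[i] = number of consecutive True values starting at index i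
--     runs = [0] * (len(bs) + 1)
--     for i in range(len(bs) - 1, -1, -1):
--         runs[i] = runs[i + 1] + 1 if bs[i] else 0
--     return runs
--
--
-- def create_inout_sequences3(iners_col, tw, p_labels):
--     n = len(iners_col)
--     labels = p_labels[:n + 1]  # no window reaches past index n
--     m = len(labels)
--     ok = [bool(r) and r[0] >= 0 for r in iners_col]
--     okrun = _true_runs(ok)
--     adjrun = _true_runs([labels[i] == labels[i + 1] for i in range(m - 1)])
--
--     def const(a, b):
--         # p_labels[a:b] has all elements equal (O(1) via adjacency runs)
--         a2 = min(a, m)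
--         L = min(b, m) - a2
--         return L <= 1 or adjrun[a2] >= L - 1
--
--     train, tr_idx, test, te_idx = [], [], [], []
--     for i in range(n - tw):
--         if const(i, i + tw + 1) and okrun[i] >= tw and all(v >= 0 for v in iners_col[i + tw]):
--             train.append((iners_col[i:i + tw], iners_col[i + tw]))
--             tr_idx.append(i + tw)
--     for j in range(n - 2 * tw):
--         if okrun[j] >= 2 * tw and const(j, j + 2 * tw):
--             test.append((iners_col[j:j + tw], iners_col[j + tw:j + 2 * tw]))
--             te_idx.append(j + tw)
--     return train, test, (tr_idx, te_idx)
-- ===== Notes on version B (the rewrite author's own statement) =====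
-- stated objective: alternative
-- what changed: Instead of rescanning each window (O(tw) work per index) for label constancy and nonnegative first elements, B precomputes two run-length arrays in one backward pass (consecutive rows with nonnegative first element, consecutive equal adjacent labels) and decides every window test in O(1); the check work drops from O(n*tw) to O(n), though building the returned window slices still costs O(output), so measured wall time is comparable.
import Mathlib
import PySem

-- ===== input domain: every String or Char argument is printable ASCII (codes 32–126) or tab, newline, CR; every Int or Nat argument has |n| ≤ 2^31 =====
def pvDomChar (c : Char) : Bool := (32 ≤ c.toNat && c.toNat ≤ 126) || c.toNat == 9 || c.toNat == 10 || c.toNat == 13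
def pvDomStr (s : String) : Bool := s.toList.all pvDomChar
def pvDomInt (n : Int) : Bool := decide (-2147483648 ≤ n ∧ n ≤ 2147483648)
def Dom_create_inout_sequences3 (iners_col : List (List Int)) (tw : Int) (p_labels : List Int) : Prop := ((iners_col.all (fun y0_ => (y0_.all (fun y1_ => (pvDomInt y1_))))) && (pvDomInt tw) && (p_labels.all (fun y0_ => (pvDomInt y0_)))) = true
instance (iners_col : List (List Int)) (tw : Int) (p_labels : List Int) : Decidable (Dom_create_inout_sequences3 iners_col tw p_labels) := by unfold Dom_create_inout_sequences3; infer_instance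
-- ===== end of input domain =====

-- B replaces A's per-window rescans by run-length arrays precomputed in one backward pass
-- (consecutive nonnegative-first-element rows, consecutive equal adjacent labels), so each
-- window test is a pair of array lookups instead of a scan of the window.


-- ===== PORT A =====
-- all([check_l[q]==check_l[0] for q in range(len(check_l))])
def pvAllEq (l : List Int) : Bool :=
  (List.range l.length).all (fun q => l.getD q 0 == l.getD 0 0)

def create_inout_sequences3 (iners_col : List (List Int)) (tw : Int) (p_labels : List Int) : (List (List (List Int) × List Int)) × (List (List (List Int) × List (List Int))) × (List Int × List Int) :=
  let n : Int := iners_col.length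
  -- first loop: train_inout_seq, train_indices
  let tr : List (List (List Int) × List Int) × List Int :=
    (PySem.List.pyRange 0 (n - tw) 1).foldl (fun st i =>
      let in_l := PySem.List.slice iners_col (some i) (some (i + tw))
      -- iners_col[i+tw:i+tw+1][0]; Python raises IndexError on an empty slice — excluded by Pre_ (tw < 0)
      let out_val := (PySem.List.slice iners_col (some (i + tw)) (some (i + tw + 1))).getD 0 []
      let check_l := PySem.List.slice p_labels (some i) (some (i + tw + 1))
      if pvAllEq check_l then
        -- k1[0]: Python raises IndexError on an empty row — excluded by Pre_; default -1 fails the ≥ 0 test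
        if in_l.all (fun k1 => decide (PySem.List.pyGetD k1 0 (-1) ≥ 0)) &&
           out_val.all (fun k2 => decide (k2 ≥ 0)) then
          (st.1 ++ [(in_l, out_val)], st.2 ++ [i + tw])
        else st
      else st) ([], [])
  -- second loop: test_seqs, test_indices
  let te : List (List (List Int) × List (List Int)) × List Int :=
    (PySem.List.pyRange 0 (n - 2 * tw) 1).foldl (fun st j =>
      let iners_l2 := PySem.List.slice iners_col (some j) (some (j + 2 * tw))
      let check_l2 := PySem.List.slice p_labels (some j) (some (j + 2 * tw))
      if iners_l2.all (fun k3 => decide (PySem.List.pyGetD k3 0 (-1) ≥ 0)) && pvAllEq check_l2 then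
        (st.1 ++ [(PySem.List.slice iners_col (some j) (some (j + tw)),
                   PySem.List.slice iners_col (some (j + tw)) (some (j + 2 * tw)))],
         st.2 ++ [j + tw])
      else st) ([], [])
  (tr.1, te.1, (tr.2, te.2))

-- ===== PORT B =====
-- runs[i] = number of consecutive true values starting at index i (built back to front)
def pvTrueRuns : List Bool → List Nat
  | [] => [0]
  | b :: t =>
    let r := pvTrueRuns t
    (if b then r.headD 0 + 1 else 0) :: r

-- B's local 'const(a, b)': p_labels[a:b] all equal, via the adjacency-run array
def pvConst (m : Int) (adjrun : List Nat) (a b : Int) : Bool :=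
  let a2 := min a m
  let L := min b m - a2
  decide (L ≤ 1) || decide (L - 1 ≤ ((adjrun.getD a2.toNat 0 : Nat) : Int))

def create_inout_sequences3_alt (iners_col : List (List Int)) (tw : Int) (p_labels : List Int) : (List (List (List Int) × List Int)) × (List (List (List Int) × List (List Int))) × (List Int × List Int) :=
  let n : Int := iners_col.length
  let labs := PySem.List.slice p_labels none (some (n + 1))  -- p_labels[:n+1]: no window reaches past index n
  let m : Nat := labs.length
  let okrun := pvTrueRuns (iners_col.map (fun r => !r.isEmpty && decide (r.getD 0 0 ≥ 0)))
  let adjrun := pvTrueRuns ((List.range (m - 1)).map (fun i => labs.getD i 0 == labs.getD (i + 1) 0))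
  let tr : List (List (List Int) × List Int) × List Int :=
    (PySem.List.pyRange 0 (n - tw) 1).foldl (fun st i =>
      if pvConst (m : Int) adjrun i (i + tw + 1) &&
         decide (tw ≤ ((okrun.getD i.toNat 0 : Nat) : Int)) &&
         (iners_col.getD (i + tw).toNat []).all (fun v => decide (v ≥ 0)) then
        (st.1 ++ [(PySem.List.slice iners_col (some i) (some (i + tw)), iners_col.getD (i + tw).toNat [])],
         st.2 ++ [i + tw])
      else st) ([], [])
  let te : List (List (List Int) × List (List Int)) × List Int :=
    (PySem.List.pyRange 0 (n - 2 * tw) 1).foldl (fun st j =>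
      if decide (2 * tw ≤ ((okrun.getD j.toNat 0 : Nat) : Int)) && pvConst (m : Int) adjrun j (j + 2 * tw) then
        (st.1 ++ [(PySem.List.slice iners_col (some j) (some (j + tw)),
                   PySem.List.slice iners_col (some (j + tw)) (some (j + 2 * tw)))],
         st.2 ++ [j + tw])
      else st) ([], [])
  (tr.1, te.1, (tr.2, te.2))

-- ===== PRECONDITION & SPEC =====
-- Pre_ excludes exactly the inputs on which Python A raises IndexError: negative tw (A then
-- always hits [0] on an empty out_val slice), and, for tw ≥ 0, inputs where some empty row
-- lies inside a label-constant train window or inside any test window (A evaluates row[0]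
-- there); on every other input A returns a value and B is proved to match it.
def Pre_create_inout_sequences3 (iners_col : List (List Int)) (tw : Int) (p_labels : List Int) : Prop :=
  0 ≤ tw ∧
  (∀ i ∈ PySem.List.pyRange 0 ((iners_col.length : Int) - tw) 1,
    ((PySem.List.slice p_labels (some i) (some (i + tw + 1))).all
       (fun x => x == (PySem.List.slice p_labels (some i) (some (i + tw + 1))).headD 0)) = true →
      [] ∉ PySem.List.slice iners_col (some i) (some (i + tw))) ∧
  (∀ j ∈ PySem.List.pyRange 0 ((iners_col.length : Int) - 2 * tw) 1,
      [] ∉ PySem.List.slice iners_col (some j) (some (j + 2 * tw)))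
instance (iners_col : List (List Int)) (tw : Int) (p_labels : List Int) : Decidable (Pre_create_inout_sequences3 iners_col tw p_labels) := by unfold Pre_create_inout_sequences3; infer_instance

def pvWitness_create_inout_sequences3 : List (List Int) × Int × List Int :=
  ([[1], [2], [0]], 1, [0, 0, 0])

def Spec_create_inout_sequences3 (iners_col : List (List Int)) (tw : Int) (p_labels : List Int) (out : (List (List (List Int) × List Int)) × (List (List (List Int) × List (List Int))) × (List Int × List Int)) : Prop := out = create_inout_sequences3_alt iners_col tw p_labels
instance (iners_col : List (List Int)) (tw : Int) (p_labels : List Int) (out : (List (List (List Int) × List Int)) × (List (List (List Int) × List (List Int))) × (List Int × List Int)) : Decidable (Spec_create_inout_sequences3 iners_col tw p_labels out) := by unfold Spec_create_inout_sequences3; infer_instance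

-- ===== CLAIM (what is proved, stated in full; the proofs are below) =====
def Claim_equal_create_inout_sequences3 : Prop := ∀ (iners_col : List (List Int)) (tw : Int) (p_labels : List Int), Dom_create_inout_sequences3 iners_col tw p_labels → Pre_create_inout_sequences3 iners_col tw p_labels → Spec_create_inout_sequences3 iners_col tw p_labels (create_inout_sequences3 iners_col tw p_labels)

-- ===== LEMMAS AND PROOFS =====

-- length of the maximal all-true prefix
def pvPrefTrue : List Bool → Nat
  | [] => 0
  | b :: t => if b then pvPrefTrue t + 1 else 0

-- adjacent-pairs equality list (proof-side view of B's comprehension)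
def pvAdjPairs : List Int → List Bool
  | [] => []
  | [_] => []
  | x :: y :: t => (x == y) :: pvAdjPairs (y :: t)

theorem pvTrueRuns_getD (bs : List Bool) (i : Nat) :
    (pvTrueRuns bs).getD i 0 = pvPrefTrue (bs.drop i) := by
  induction bs generalizing i with
  | nil => cases i <;> simp [pvTrueRuns, pvPrefTrue]
  | cons b t ih =>
    cases i with
    | zero =>
      have h0 := ih 0
      simp at h0
      simp [pvTrueRuns, pvPrefTrue, List.head?_eq_getElem?, h0]
    | succ i => simpa [pvTrueRuns] using ih i

theorem pvTakeAll_eq_prefTrue (t : List Bool) (k : Nat) (hk : k ≤ t.length) :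
    (t.take k).all id = decide (k ≤ pvPrefTrue t) := by
  induction t generalizing k with
  | nil =>
    have : k = 0 := Nat.le_zero.mp hk
    subst this; simp [pvPrefTrue]
  | cons b t ih =>
    cases k with
    | zero => simp
    | succ k =>
      simp only [List.take_succ_cons, List.all_cons, id]
      cases hb : b with
      | false => simp [pvPrefTrue]
      | true =>
        have := ih k (by simpa using hk)
        simp [pvPrefTrue, this]

theorem pvRange_all_getD (t : List Int) (p : Int → Bool) (d : Int) :
    (List.range t.length).all (fun q => p (t.getD q d)) = t.all p := by
  induction t with
  | nil => simp
  | cons x t ih =>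
    simp only [List.length_cons, List.range_succ_eq_map, List.all_cons, List.all_map]
    simpa using congrArg (fun z => p x && z) ih

theorem pvAllEq_nil : pvAllEq [] = true := rfl

theorem pvAllEq_cons (x : Int) (t : List Int) : pvAllEq (x :: t) = t.all (· == x) := by
  have h := pvRange_all_getD (x :: t) (· == x) 0
  simp only [List.all_cons, BEq.rfl, Bool.true_and] at h
  unfold pvAllEq
  simpa using h

theorem pvAdjPairs_eq_range (l : List Int) :
    (List.range (l.length - 1)).map (fun i => l.getD i 0 == l.getD (i + 1) 0) = pvAdjPairs l := by
  induction l with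
  | nil => simp [pvAdjPairs]
  | cons x t ih =>
    cases t with
    | nil => simp [pvAdjPairs]
    | cons y t2 =>
      simp only [List.length_cons, Nat.add_sub_cancel, List.range_succ_eq_map, List.map_cons,
        List.map_map, pvAdjPairs]
      simp only [List.getD_cons_zero, List.getD_cons_succ, List.cons.injEq]
      refine ⟨by simp, by simpa [Function.comp] using ih⟩

theorem pvAdjPairs_drop (l : List Int) (a : Nat) :
    pvAdjPairs (l.drop a) = (pvAdjPairs l).drop a := by
  induction l generalizing a with
  | nil => simp [pvAdjPairs]
  | cons x t ih =>
    cases a with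
    | zero => simp
    | succ a =>
      cases t with
      | nil => cases a <;> simp [pvAdjPairs]
      | cons y t2 => simpa [pvAdjPairs] using ih a

theorem pvAllEq_take (t : List Int) (k : Nat) :
    pvAllEq (t.take k) =
      decide (min k t.length ≤ 1 ∨ min k t.length - 1 ≤ pvPrefTrue (pvAdjPairs t)) := by
  induction t generalizing k with
  | nil => simp [pvAllEq]
  | cons x t ih =>
    cases k with
    | zero => simp [pvAllEq]
    | succ k =>
      rw [List.take_succ_cons, pvAllEq_cons]
      cases t with
      | nil =>
        simp only [List.take_nil, List.all_nil, List.length_cons, List.length_nil]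
        symm
        simp only [decide_eq_true_eq]
        omega
      | cons y t2 =>
        cases k with
        | zero =>
          simp only [List.take_zero, List.all_nil, List.length_cons]
          symm
          simp only [decide_eq_true_eq]
          omega
        | succ k =>
          rw [List.take_succ_cons, List.all_cons]
          cases hxy : (x == y) with
          | false =>
            have hyx : (y == x) = false := by
              rw [beq_eq_false_iff_ne] at hxy ⊢
              exact fun h => hxy h.symm
            simp [pvAdjPairs, pvPrefTrue, hxy, hyx]
          | true =>
            have hxy' : x = y := by simpa using hxy
            subst hxy'
            have hone : (x == x) = true := by simp
            have h2 := ih (k + 1)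
            rw [List.take_succ_cons, pvAllEq_cons] at h2
            rw [hone, Bool.true_and, h2]
            have hadj : pvPrefTrue (pvAdjPairs (x :: x :: t2)) =
                pvPrefTrue (pvAdjPairs (x :: t2)) + 1 := by
              simp [pvAdjPairs, pvPrefTrue]
            rw [hadj, decide_eq_decide]
            simp only [List.length_cons]
            omega

-- pvAllEq of a slice of labels = B's O(1) run-array check
theorem pvConst_correct (labels : List Int) (a b : Int) (ha : 0 ≤ a) (hb : 0 ≤ b) :
    pvAllEq (PySem.List.slice labels (some a) (some b)) =
      pvConst (labels.length : Int)
        (pvTrueRuns ((List.range (labels.length - 1)).map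
          (fun i => labels.getD i 0 == labels.getD (i + 1) 0))) a b := by
  rw [pvAdjPairs_eq_range, PySem.List.slice_toNat labels ha hb]
  by_cases ham : labels.length ≤ a.toNat
  · rw [List.drop_of_length_le ham]
    simp only [List.take_nil, pvAllEq_nil, pvConst]
    have : min a (labels.length : Int) = (labels.length : Int) := by omega
    rw [this]
    have hL : min b (labels.length : Int) - (labels.length : Int) ≤ 1 := by omega
    simp [hL]
  · rw [Nat.not_le] at ham
    rw [pvAllEq_take, pvAdjPairs_drop, ← pvTrueRuns_getD]
    unfold pvConst
    have ha2 : min a (labels.length : Int) = a := by omega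
    rw [ha2]
    rw [← Bool.decide_or, decide_eq_decide]
    simp only [List.length_drop]
    omega

theorem pvOk_eq (r : List Int) :
    decide (PySem.List.pyGetD r 0 (-1) ≥ 0) = (!r.isEmpty && decide (r.getD 0 0 ≥ 0)) := by
  cases r <;> simp [PySem.List.pyGetD_zero]

-- window all-first-nonnegative = B's O(1) run-array check
theorem pvOkrun_correct (rows : List (List Int)) (i k : Int) (hi : 0 ≤ i) (hk : 0 ≤ k)
    (hik : i + k ≤ (rows.length : Int)) :
    (PySem.List.slice rows (some i) (some (i + k))).all
        (fun k1 => decide (PySem.List.pyGetD k1 0 (-1) ≥ 0)) =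
      decide (k ≤ (((pvTrueRuns (rows.map (fun r => !r.isEmpty && decide (r.getD 0 0 ≥ 0)))).getD i.toNat 0 : Nat) : Int)) := by
  rw [PySem.List.slice_toNat rows hi (by omega)]
  have hmap : (fun k1 : List Int => decide (PySem.List.pyGetD k1 0 (-1) ≥ 0)) =
      (fun r : List Int => !r.isEmpty && decide (r.getD 0 0 ≥ 0)) := funext pvOk_eq
  rw [hmap]
  have hall : ((rows.drop i.toNat).take ((i + k).toNat - i.toNat)).all
        (fun r : List Int => !r.isEmpty && decide (r.getD 0 0 ≥ 0)) =
      (((rows.map (fun r : List Int => !r.isEmpty && decide (r.getD 0 0 ≥ 0))).drop i.toNat).take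
        ((i + k).toNat - i.toNat)).all id := by
    rw [← List.map_drop, ← List.map_take, List.all_map]
    rfl
  rw [hall, pvTakeAll_eq_prefTrue _ _ (by
      simp only [List.length_drop, List.length_map]
      omega),
    pvTrueRuns_getD, decide_eq_decide]
  omega

theorem pvOut_eq (rows : List (List Int)) (j : Int) (hj : 0 ≤ j) (hjn : j < (rows.length : Int)) :
    (PySem.List.slice rows (some j) (some (j + 1))).getD 0 [] = rows.getD j.toNat [] := by
  rw [PySem.List.slice_toNat rows hj (by omega)]
  have h1 : (j + 1).toNat - j.toNat = 1 := by omega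
  rw [h1]
  have hjl : j.toNat < rows.length := by omega
  simp [List.getD_eq_getElem?_getD, List.getElem?_drop]


theorem pvSliceTrunc (l : List Int) (a b T : Int) (h0 : 0 ≤ a) (hb : 0 ≤ b) (hbT : b ≤ T)
    (hT0 : 0 ≤ T) :
    PySem.List.slice (PySem.List.slice l none (some T)) (some a) (some b) =
      PySem.List.slice l (some a) (some b) := by
  rw [PySem.List.slice_to l hT0, PySem.List.slice_toNat _ h0 hb, PySem.List.slice_toNat _ h0 hb,
    List.drop_take, List.take_take]
  congr 1
  omega

theorem pvIfAnd {α : Type} (c1 c2 c3 : Bool) (x s : α) :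
    (if c1 then if c2 && c3 then x else s else s) = (if c1 && c2 && c3 then x else s) := by
  cases c1 <;> cases c2 <;> cases c3 <;> simp

theorem pvTrainFold_eq (rows : List (List Int)) (tw : Int) (labels : List Int) (htw : 0 ≤ tw) :
    (PySem.List.pyRange 0 ((rows.length : Int) - tw) 1).foldl
      (fun (st : List (List (List Int) × List Int) × List Int) i =>
        if pvAllEq (PySem.List.slice labels (some i) (some (i + tw + 1))) then
          if (PySem.List.slice rows (some i) (some (i + tw))).all
               (fun k1 => decide (PySem.List.pyGetD k1 0 (-1) ≥ 0)) &&
             ((PySem.List.slice rows (some (i + tw)) (some (i + tw + 1))).getD 0 []).all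
               (fun k2 => decide (k2 ≥ 0)) then
            (st.1 ++ [(PySem.List.slice rows (some i) (some (i + tw)),
                       (PySem.List.slice rows (some (i + tw)) (some (i + tw + 1))).getD 0 [])],
             st.2 ++ [i + tw])
          else st
        else st) ([], []) =
    (PySem.List.pyRange 0 ((rows.length : Int) - tw) 1).foldl
      (fun (st : List (List (List Int) × List Int) × List Int) i =>
        if pvConst ((PySem.List.slice labels none (some ((rows.length : Int) + 1))).length : Int)
             (pvTrueRuns ((List.range ((PySem.List.slice labels none (some ((rows.length : Int) + 1))).length - 1)).map
               (fun q => (PySem.List.slice labels none (some ((rows.length : Int) + 1))).getD q 0 ==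
                 (PySem.List.slice labels none (some ((rows.length : Int) + 1))).getD (q + 1) 0))) i (i + tw + 1) &&
           decide (tw ≤ (((pvTrueRuns (rows.map (fun r => !r.isEmpty && decide (r.getD 0 0 ≥ 0)))).getD i.toNat 0 : Nat) : Int)) &&
           (rows.getD (i + tw).toNat []).all (fun v => decide (v ≥ 0)) then
          (st.1 ++ [(PySem.List.slice rows (some i) (some (i + tw)), rows.getD (i + tw).toNat [])],
           st.2 ++ [i + tw])
        else st) ([], []) := by
  refine PySem.List.foldl_congr_mem _ _ _ _ ?_
  intro st i hi
  rw [PySem.List.mem_pyRange_one] at hi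
  obtain ⟨h0, h1⟩ := hi
  rw [← pvSliceTrunc labels i (i + tw + 1) ((rows.length : Int) + 1) h0 (by omega) (by omega) (by omega),
    pvConst_correct (PySem.List.slice labels none (some ((rows.length : Int) + 1))) i (i + tw + 1) h0 (by omega),
    pvOkrun_correct rows i tw h0 htw (by omega),
    pvOut_eq rows (i + tw) (by omega) (by omega)]
  exact pvIfAnd _ _ _ _ _

theorem pvTestFold_eq (rows : List (List Int)) (tw : Int) (labels : List Int) (htw : 0 ≤ tw) :
    (PySem.List.pyRange 0 ((rows.length : Int) - 2 * tw) 1).foldl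
      (fun (st : List (List (List Int) × List (List Int)) × List Int) j =>
        if (PySem.List.slice rows (some j) (some (j + 2 * tw))).all
             (fun k3 => decide (PySem.List.pyGetD k3 0 (-1) ≥ 0)) &&
           pvAllEq (PySem.List.slice labels (some j) (some (j + 2 * tw))) then
          (st.1 ++ [(PySem.List.slice rows (some j) (some (j + tw)),
                     PySem.List.slice rows (some (j + tw)) (some (j + 2 * tw)))],
           st.2 ++ [j + tw])
        else st) ([], []) =
    (PySem.List.pyRange 0 ((rows.length : Int) - 2 * tw) 1).foldl
      (fun (st : List (List (List Int) × List (List Int)) × List Int) j =>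
        if decide (2 * tw ≤ (((pvTrueRuns (rows.map (fun r => !r.isEmpty && decide (r.getD 0 0 ≥ 0)))).getD j.toNat 0 : Nat) : Int)) &&
           pvConst ((PySem.List.slice labels none (some ((rows.length : Int) + 1))).length : Int)
             (pvTrueRuns ((List.range ((PySem.List.slice labels none (some ((rows.length : Int) + 1))).length - 1)).map
               (fun q => (PySem.List.slice labels none (some ((rows.length : Int) + 1))).getD q 0 ==
                 (PySem.List.slice labels none (some ((rows.length : Int) + 1))).getD (q + 1) 0))) j (j + 2 * tw) then
          (st.1 ++ [(PySem.List.slice rows (some j) (some (j + tw)),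
                     PySem.List.slice rows (some (j + tw)) (some (j + 2 * tw)))],
           st.2 ++ [j + tw])
        else st) ([], []) := by
  refine PySem.List.foldl_congr_mem _ _ _ _ ?_
  intro st j hj
  rw [PySem.List.mem_pyRange_one] at hj
  obtain ⟨h0, h1⟩ := hj
  rw [← pvSliceTrunc labels j (j + 2 * tw) ((rows.length : Int) + 1) h0 (by omega) (by omega) (by omega),
    pvConst_correct (PySem.List.slice labels none (some ((rows.length : Int) + 1))) j (j + 2 * tw) h0 (by omega),
    pvOkrun_correct rows j (2 * tw) h0 (by omega) (by omega)]

-- ===== VERDICT (by name: the statement is the Claim_ definition above) =====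
theorem create_inout_sequences3_spec : Claim_equal_create_inout_sequences3 := by
  intro rows tw labels _hdom hpre
  obtain ⟨htw, -⟩ := hpre
  unfold Spec_create_inout_sequences3 create_inout_sequences3 create_inout_sequences3_alt
  dsimp only
  rw [pvTrainFold_eq rows tw labels htw, pvTestFold_eq rows tw labels htw]
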